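-- pv_equiv track=rewrite | github.com/bhaktibagadia/GeeksforGeeks-Practice | Difficulty: Easy/Coverage of all Zeros in a Binary Matrix/coverage-of-all-zeros-in-a-binary-matrix.py | findCoverage
-- ===== SOURCE A (Python) =====
-- def findCoverage(matrix):
-- 	# Code here
-- 	def totalcoverage(x,y):
-- 	    cov=0
-- 	    if 0<=x+1<len(matrix) and matrix[x+1][y]==1:
-- 	        cov+=1
-- 	    if 0<=x-1<len(matrix) and matrix[x-1][y]==1:
-- 	        cov+=1
-- 	    if 0<=y+1<len(matrix[0]) and matrix[x][y+1]==1: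
-- 	        cov+=1
-- 	    if 0<=y-1<len(matrix[0]) and matrix[x][y-1]==1:
-- 	        cov+=1
-- 	    return cov
--
-- 	ans=0
-- 	for i in range(len(matrix)):
-- 	    for j in range(len(matrix[0])):
-- 	        if matrix[i][j]==0:
-- 	            ans+=totalcoverage(i,j)
-- 	return ans
-- ===== SOURCE B (Python) =====
-- def findCoverage(matrix):
--     # Count each 0/1-adjacent pair once: probe only right and down neighbours,
--     # over the grid of width len(matrix[0]).
--     if not matrix:
--         return 0
--     w = len(matrix[0])
--
--     def pairs01(xs, ys):
--         return sum(1 for a, b in zip(xs, ys) if (a, b) in ((0, 1), (1, 0)))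
--
--     total = sum(pairs01(row[:w], row[1:w]) for row in matrix)
--     total += sum(pairs01(r1[:w], r2[:w]) for r1, r2 in zip(matrix, matrix[1:]))
--     return total
-- ===== Notes on version B (the rewrite author's own statement) =====
-- stated objective: simpler
-- what changed: Instead of scanning for zero cells and probing all four neighbours of each with index/bounds arithmetic, B counts each 0/1-adjacent pair of the grid exactly once by zipping every row with its own tail (horizontal pairs) and the matrix with its tail (vertical pairs).
import Mathlib
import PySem

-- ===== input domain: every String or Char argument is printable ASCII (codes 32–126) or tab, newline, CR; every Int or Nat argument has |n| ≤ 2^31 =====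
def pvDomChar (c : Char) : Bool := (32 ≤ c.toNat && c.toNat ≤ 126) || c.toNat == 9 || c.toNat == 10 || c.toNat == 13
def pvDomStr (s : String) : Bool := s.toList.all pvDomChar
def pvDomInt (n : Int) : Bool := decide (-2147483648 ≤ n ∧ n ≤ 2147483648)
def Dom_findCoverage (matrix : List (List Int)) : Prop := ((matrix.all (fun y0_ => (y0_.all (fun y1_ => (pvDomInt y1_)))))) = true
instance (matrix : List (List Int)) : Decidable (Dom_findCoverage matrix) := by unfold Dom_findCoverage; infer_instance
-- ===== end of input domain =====

-- B counts each 0/1-adjacent pair of the R × len(matrix[0]) grid once via zips of rows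
-- (and of consecutive rows), instead of A's per-zero-cell probing of all four neighbours;
-- objective: simpler (no index arithmetic, no per-cell branch).

-- ===== PORT A =====
-- totalcoverage(x, y): the four guarded neighbour probes, accumulated into cov.
-- matrix[a][b] is ported as pyGetD/pyGetD; under Pre_ every access A performs is in range.
def pvTc (matrix : List (List Int)) (x y : Int) : Int :=
  let cov : Int := 0
  let cov := if 0 ≤ x + 1 ∧ x + 1 < (matrix.length : Int) ∧
      PySem.List.pyGetD (PySem.List.pyGetD matrix (x + 1) []) y 0 = 1 then cov + 1 else cov
  let cov := if 0 ≤ x - 1 ∧ x - 1 < (matrix.length : Int) ∧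
      PySem.List.pyGetD (PySem.List.pyGetD matrix (x - 1) []) y 0 = 1 then cov + 1 else cov
  let cov := if 0 ≤ y + 1 ∧ y + 1 < ((PySem.List.pyGetD matrix 0 []).length : Int) ∧
      PySem.List.pyGetD (PySem.List.pyGetD matrix x []) (y + 1) 0 = 1 then cov + 1 else cov
  let cov := if 0 ≤ y - 1 ∧ y - 1 < ((PySem.List.pyGetD matrix 0 []).length : Int) ∧
      PySem.List.pyGetD (PySem.List.pyGetD matrix x []) (y - 1) 0 = 1 then cov + 1 else cov
  cov

def findCoverage (matrix : List (List Int)) : Int :=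
  (PySem.List.pyRange 0 (matrix.length : Int) 1).foldl (fun ans i =>
    (PySem.List.pyRange 0 ((PySem.List.pyGetD matrix 0 []).length : Int) 1).foldl (fun ans j =>
      if PySem.List.pyGetD (PySem.List.pyGetD matrix i []) j 0 = 0
      then ans + pvTc matrix i j else ans) ans) 0

-- ===== PORT B =====
-- pairs01(xs, ys) = sum(1 for a, b in zip(xs, ys) if (a, b) in ((0, 1), (1, 0)))
def pvPairs01 (xs ys : List Int) : Int :=
  ((xs.zip ys).map (fun p =>
    if (p.1 = 0 ∧ p.2 = 1) ∨ (p.1 = 1 ∧ p.2 = 0) then (1 : Int) else 0)).sum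

def findCoverage_alt (matrix : List (List Int)) : Int :=
  if matrix = [] then 0
  else
    let w : Int := ((matrix.headD []).length : Int)     -- len(matrix[0]); matrix is nonempty here
    -- total = sum(pairs01(row[:w], row[1:w]) for row in matrix)
    let total : Int := (matrix.map (fun row =>
      pvPairs01 (PySem.List.slice row none (some w)) (PySem.List.slice row (some 1) (some w)))).sum
    -- total += sum(pairs01(r1[:w], r2[:w]) for r1, r2 in zip(matrix, matrix[1:]))
    total + ((matrix.zip (PySem.List.slice matrix (some 1) none)).map (fun p =>
      pvPairs01 (PySem.List.slice p.1 none (some w)) (PySem.List.slice p.2 none (some w)))).sum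

-- ===== PRECONDITION & SPEC =====
-- Pre_ is exactly A's return domain: every row at least as long as the first row
-- (A reads every cell matrix[i][j] for j < len(matrix[0]) and raises IndexError on a shorter row).
def Pre_findCoverage (matrix : List (List Int)) : Prop :=
  ∀ row ∈ matrix, (matrix.headD []).length ≤ row.length
instance (matrix : List (List Int)) : Decidable (Pre_findCoverage matrix) := by
  unfold Pre_findCoverage; infer_instance

def pvWitness_findCoverage : List (List Int) := [[0, 1], [1, 0]]

def Spec_findCoverage (matrix : List (List Int)) (out : Int) : Prop := out = findCoverage_alt matrix
instance (matrix : List (List Int)) (out : Int) : Decidable (Spec_findCoverage matrix out) := by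
  unfold Spec_findCoverage; infer_instance

-- ===== CLAIM (what is proved, stated in full; the proofs are below) =====
def Claim_equal_findCoverage : Prop := ∀ (matrix : List (List Int)), Dom_findCoverage matrix → Pre_findCoverage matrix → Spec_findCoverage matrix (findCoverage matrix)

-- ===== LEMMAS AND PROOFS =====

-- grid dimensions and cell values (proof-side abbreviations)
def pvR (m : List (List Int)) : Nat := m.length
def pvC (m : List (List Int)) : Nat := (m.headD []).length
def pvV (m : List (List Int)) (i j : Nat) : Int := (m.getD i []).getD j 0

def pvP (a b : Int) : Int := if (a = 0 ∧ b = 1) ∨ (a = 1 ∧ b = 0) then 1 else 0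

-- A's contribution of cell (i, j): the four guarded indicators of totalcoverage
def pvCell (m : List (List Int)) (i j : Nat) : Int :=
    (if pvV m i j = 0 ∧ i + 1 < pvR m ∧ pvV m (i+1) j = 1 then (1:Int) else 0)
  + (if pvV m i j = 0 ∧ 1 ≤ i ∧ pvV m (i-1) j = 1 then (1:Int) else 0)
  + (if pvV m i j = 0 ∧ j + 1 < pvC m ∧ pvV m i (j+1) = 1 then (1:Int) else 0)
  + (if pvV m i j = 0 ∧ 1 ≤ j ∧ pvV m i (j-1) = 1 then (1:Int) else 0)

lemma pv_foldl_sum {α : Type} (g : α → Int) (step : Int → α → Int)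
    (hstep : ∀ acc x, step acc x = acc + g x) :
    ∀ (l : List α) (init : Int), l.foldl step init = init + (l.map g).sum := by
  intro l
  induction l with
  | nil => simp
  | cons a t ih => intro init; simp [List.foldl, hstep, ih]; ring

lemma pv_ite_acc (c : Prop) [Decidable c] (X : Int) :
    (if c then X + 1 else X) = X + (if c then (1:Int) else 0) := by split_ifs <;> ring

lemma pv_head (m : List (List Int)) : PySem.List.pyGetD m 0 [] = m.headD [] := by
  cases m <;> simp [PySem.List.pyGetD_zero]



lemma pv_L1 (m : List (List Int)) (i j : Nat) :
    (if 0 ≤ (i:Int) + 1 ∧ (i:Int) + 1 < (m.length : Int) ∧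
        PySem.List.pyGetD (PySem.List.pyGetD m ((i:Int) + 1) []) (j:Int) 0 = 1 then (1:Int) else 0)
  = (if i + 1 < pvR m ∧ pvV m (i+1) j = 1 then (1:Int) else 0) := by
  have e : ((i:Int) + 1) = ((i+1 : Nat) : Int) := by push_cast; ring
  simp only [e, PySem.List.pyGetD_natCast, pvV, pvR]
  refine if_congr ?_ rfl rfl
  constructor
  · rintro ⟨-, h2, h3⟩; exact ⟨by exact_mod_cast h2, h3⟩
  · rintro ⟨h2, h3⟩; exact ⟨Int.natCast_nonneg _, by exact_mod_cast h2, h3⟩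

lemma pv_L2 (m : List (List Int)) (i j : Nat) (hi : i < pvR m) :
    (if 0 ≤ (i:Int) - 1 ∧ (i:Int) - 1 < (m.length : Int) ∧
        PySem.List.pyGetD (PySem.List.pyGetD m ((i:Int) - 1) []) (j:Int) 0 = 1 then (1:Int) else 0)
  = (if 1 ≤ i ∧ pvV m (i-1) j = 1 then (1:Int) else 0) := by
  cases i with
  | zero => simp
  | succ i' =>
    have e : ((i'+1 : Nat) : Int) - 1 = ((i' : Nat) : Int) := by push_cast; ring
    have hi' : i' < m.length := by simpa [pvR] using Nat.lt_of_succ_lt hi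
    simp only [e, PySem.List.pyGetD_natCast, pvV, Nat.add_sub_cancel]
    refine if_congr ?_ rfl rfl
    constructor
    · rintro ⟨-, -, h3⟩; exact ⟨Nat.le_add_left 1 i', h3⟩
    · rintro ⟨-, h3⟩; exact ⟨Int.natCast_nonneg _, by exact_mod_cast hi', h3⟩

lemma pv_L3 (m : List (List Int)) (i j : Nat) :
    (if 0 ≤ (j:Int) + 1 ∧ (j:Int) + 1 < ((m.headD []).length : Int) ∧
        PySem.List.pyGetD (PySem.List.pyGetD m (i:Int) []) ((j:Int) + 1) 0 = 1 then (1:Int) else 0)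
  = (if j + 1 < pvC m ∧ pvV m i (j+1) = 1 then (1:Int) else 0) := by
  have e : ((j:Int) + 1) = ((j+1 : Nat) : Int) := by push_cast; ring
  simp only [e, PySem.List.pyGetD_natCast, pvV, pvC]
  refine if_congr ?_ rfl rfl
  constructor
  · rintro ⟨-, h2, h3⟩; exact ⟨by exact_mod_cast h2, h3⟩
  · rintro ⟨h2, h3⟩; exact ⟨Int.natCast_nonneg _, by exact_mod_cast h2, h3⟩

lemma pv_L4 (m : List (List Int)) (i j : Nat) (hj : j < pvC m) :
    (if 0 ≤ (j:Int) - 1 ∧ (j:Int) - 1 < ((m.headD []).length : Int) ∧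
        PySem.List.pyGetD (PySem.List.pyGetD m (i:Int) []) ((j:Int) - 1) 0 = 1 then (1:Int) else 0)
  = (if 1 ≤ j ∧ pvV m i (j-1) = 1 then (1:Int) else 0) := by
  cases j with
  | zero => simp
  | succ j' =>
    have e : ((j'+1 : Nat) : Int) - 1 = ((j' : Nat) : Int) := by push_cast; ring
    have hj' : j' < (m.headD []).length := by simpa [pvC] using Nat.lt_of_succ_lt hj
    simp only [e, PySem.List.pyGetD_natCast, pvV, Nat.add_sub_cancel]
    refine if_congr ?_ rfl rfl
    constructor
    · rintro ⟨-, -, h3⟩; exact ⟨Nat.le_add_left 1 j', h3⟩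
    · rintro ⟨-, h3⟩; exact ⟨Int.natCast_nonneg _, by exact_mod_cast hj', h3⟩

lemma pv_cell_eq (m : List (List Int)) (i j : Nat) (hi : i < pvR m) (hj : j < pvC m) :
    (if PySem.List.pyGetD (PySem.List.pyGetD m (i:Int) []) (j:Int) 0 = 0
     then pvTc m (i:Int) (j:Int) else 0) = pvCell m i j := by
  have hv : PySem.List.pyGetD (PySem.List.pyGetD m (i:Int) []) (j:Int) 0 = pvV m i j := by
    simp [pvV]
  rw [hv]
  by_cases h0 : pvV m i j = 0
  · rw [if_pos h0]
    simp only [pvTc, pv_ite_acc, pv_head, zero_add]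
    rw [pv_L1, pv_L2 m i j hi, pv_L3, pv_L4 m i j hj]
    simp [pvCell, h0]
  · rw [if_neg h0]
    simp [pvCell, h0]

lemma pv_bridge (n : Nat) (f : Nat → Int) :
    ((List.range n).map f).sum = ∑ k ∈ Finset.range n, f k := rfl

lemma pv_A_cells (m : List (List Int)) :
    findCoverage m = ∑ i ∈ Finset.range (pvR m), ∑ j ∈ Finset.range (pvC m), pvCell m i j := by
  unfold findCoverage
  simp only [PySem.List.pyRange_one, Int.sub_zero, Int.toNat_natCast, List.foldl_map, zero_add,
    pv_head]
  rw [pv_foldl_sum (fun i : Nat => ((List.range (m.headD []).length).map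
        (fun j : Nat => if PySem.List.pyGetD (PySem.List.pyGetD m (i:Int) []) (j:Int) 0 = 0
                        then pvTc m (i:Int) (j:Int) else 0)).sum) _
      (fun acc i => pv_foldl_sum _ _ (fun a x => by split_ifs <;> ring) _ acc) _ 0]
  rw [zero_add, pv_bridge]
  apply Finset.sum_congr rfl
  intro i hi
  rw [pv_bridge]
  apply Finset.sum_congr rfl
  intro j hj
  exact pv_cell_eq m i j (by simpa [pvR] using Finset.mem_range.mp hi)
    (by simpa [pvC] using Finset.mem_range.mp hj)

lemma pv_g1 (n : Nat) (F : Nat → Int) :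
    ∑ k ∈ Finset.range n, (if k + 1 < n then F k else 0) = ∑ k ∈ Finset.range (n-1), F k := by
  cases n with
  | zero => simp
  | succ m =>
    rw [Finset.sum_range_succ]
    simp only [Nat.add_sub_cancel]
    have : ∀ k ∈ Finset.range m, (if k + 1 < m + 1 then F k else 0) = F k := by
      intro k hk; rw [Finset.mem_range] at hk; simp [Nat.succ_lt_succ hk]
    rw [Finset.sum_congr rfl this]; simp

lemma pv_g2 (n : Nat) (G : Nat → Int) :
    ∑ k ∈ Finset.range n, (if 1 ≤ k then G k else 0) = ∑ k ∈ Finset.range (n-1), G (k+1) := by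
  cases n with
  | zero => simp
  | succ m => rw [Finset.sum_range_succ']; simp

lemma pv_pairP (a b : Int) :
    (if a = 0 ∧ b = 1 then (1:Int) else 0) + (if b = 0 ∧ a = 1 then (1:Int) else 0) = pvP a b := by
  unfold pvP; split_ifs <;> omega

lemma pv_reord (a b c : Prop) [Decidable a] [Decidable b] [Decidable c] :
    (if a ∧ b ∧ c then (1:Int) else 0) = if b then (if a ∧ c then (1:Int) else 0) else 0 := by
  split_ifs <;> tauto

lemma pv_pull (c : Prop) [Decidable c] (n : Nat) (X : Nat → Int) :
    ∑ j ∈ Finset.range n, (if c then X j else 0) = if c then ∑ j ∈ Finset.range n, X j else 0 := by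
  split_ifs <;> simp

lemma pv_grid_gen (v : Nat → Nat → Int) (R C : Nat) :
    (∑ i ∈ Finset.range R, ∑ j ∈ Finset.range C,
       ((if v i j = 0 ∧ i + 1 < R ∧ v (i+1) j = 1 then (1:Int) else 0)
      + (if v i j = 0 ∧ 1 ≤ i ∧ v (i-1) j = 1 then (1:Int) else 0)
      + (if v i j = 0 ∧ j + 1 < C ∧ v i (j+1) = 1 then (1:Int) else 0)
      + (if v i j = 0 ∧ 1 ≤ j ∧ v i (j-1) = 1 then (1:Int) else 0)))
  = (∑ i ∈ Finset.range R, ∑ j ∈ Finset.range (C-1), pvP (v i j) (v i (j+1)))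
  + (∑ i ∈ Finset.range (R-1), ∑ j ∈ Finset.range C, pvP (v i j) (v (i+1) j)) := by
  have hV : (∑ i ∈ Finset.range R, ∑ j ∈ Finset.range C,
               (if v i j = 0 ∧ i + 1 < R ∧ v (i+1) j = 1 then (1:Int) else 0))
          + (∑ i ∈ Finset.range R, ∑ j ∈ Finset.range C,
               (if v i j = 0 ∧ 1 ≤ i ∧ v (i-1) j = 1 then (1:Int) else 0))
      = ∑ i ∈ Finset.range (R-1), ∑ j ∈ Finset.range C, pvP (v i j) (v (i+1) j) := by
    simp only [pv_reord, pv_pull, pv_g1, pv_g2, Nat.add_sub_cancel]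
    rw [← Finset.sum_add_distrib]
    apply Finset.sum_congr rfl
    intro i _
    rw [← Finset.sum_add_distrib]
    apply Finset.sum_congr rfl
    intro j _
    exact pv_pairP (v i j) (v (i+1) j)
  have hH : ∀ i, (∑ j ∈ Finset.range C, (if v i j = 0 ∧ j + 1 < C ∧ v i (j+1) = 1 then (1:Int) else 0))
              + (∑ j ∈ Finset.range C, (if v i j = 0 ∧ 1 ≤ j ∧ v i (j-1) = 1 then (1:Int) else 0))
      = ∑ j ∈ Finset.range (C-1), pvP (v i j) (v i (j+1)) := by
    intro i
    simp only [pv_reord, pv_g1, pv_g2, Nat.add_sub_cancel]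
    rw [← Finset.sum_add_distrib]
    apply Finset.sum_congr rfl
    intro j _
    exact pv_pairP (v i j) (v i (j+1))
  calc (∑ i ∈ Finset.range R, ∑ j ∈ Finset.range C, _)
      = (∑ i ∈ Finset.range R, ∑ j ∈ Finset.range C,
           (if v i j = 0 ∧ i + 1 < R ∧ v (i+1) j = 1 then (1:Int) else 0))
      + (∑ i ∈ Finset.range R, ∑ j ∈ Finset.range C,
           (if v i j = 0 ∧ 1 ≤ i ∧ v (i-1) j = 1 then (1:Int) else 0))
      + (∑ i ∈ Finset.range R, ∑ j ∈ Finset.range C,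
           (if v i j = 0 ∧ j + 1 < C ∧ v i (j+1) = 1 then (1:Int) else 0))
      + (∑ i ∈ Finset.range R, ∑ j ∈ Finset.range C,
           (if v i j = 0 ∧ 1 ≤ j ∧ v i (j-1) = 1 then (1:Int) else 0)) := by
        simp only [Finset.sum_add_distrib]
    _ = _ := by
        rw [add_assoc, hV, ← Finset.sum_add_distrib,
          Finset.sum_congr rfl (fun i _ => hH i)]
        ring

lemma pv_zipP (xs : List Int) : ∀ (ys : List Int),
    pvPairs01 xs ys
      = ∑ j ∈ Finset.range (min xs.length ys.length), pvP (xs.getD j 0) (ys.getD j 0) := by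
  induction xs with
  | nil => intro ys; simp [pvPairs01]
  | cons a t ih =>
    intro ys
    cases ys with
    | nil => simp [pvPairs01]
    | cons b u =>
      show pvP a b + pvPairs01 t u = _
      rw [ih u]
      have hmin : min (a :: t).length (b :: u).length = min t.length u.length + 1 := by
        simp only [List.length_cons]; omega
      rw [hmin, Finset.sum_range_succ']
      simp [add_comm]

lemma pv_map_getD {α : Type} (d : α) (f : α → Int) :
    ∀ (l : List α), (l.map f).sum = ∑ i ∈ Finset.range l.length, f (l.getD i d) := by
  intro l
  induction l with
  | nil => simp
  | cons a t ih =>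
    simp only [List.map_cons, List.sum_cons, List.length_cons, Finset.sum_range_succ']
    rw [ih]; simp [add_comm]

lemma pv_zip_consec {α : Type} (d : α) (f : α → α → Int) :
    ∀ (l : List α), ((l.zip l.tail).map (fun p => f p.1 p.2)).sum
      = ∑ i ∈ Finset.range (l.length - 1), f (l.getD i d) (l.getD (i+1) d) := by
  intro l
  induction l with
  | nil => simp
  | cons a t ih =>
    cases t with
    | nil => simp
    | cons b u =>
      show f a b + ((List.zip (b::u) (b::u).tail).map (fun p => f p.1 p.2)).sum = _
      rw [ih]
      simp only [List.length_cons, Nat.add_sub_cancel, Finset.sum_range_succ']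
      simp [add_comm]
      apply Finset.sum_congr rfl
      intro x _
      have h2 : 1 + (x + 1) = x + 2 := by omega
      rw [h2]
      simp

lemma pv_getD_take {α : Type} (l : List α) (n j : Nat) (d : α) (h : j < n) :
    (l.take n).getD j d = l.getD j d := by
  rw [List.getD_eq_getElem?_getD, List.getD_eq_getElem?_getD, List.getElem?_take]
  simp [h]

lemma pv_getD_drop {α : Type} (l : List α) (m j : Nat) (d : α) :
    (l.drop m).getD j d = l.getD (m + j) d := by
  rw [List.getD_eq_getElem?_getD, List.getD_eq_getElem?_getD, List.getElem?_drop]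

lemma pv_pairs_horiz (row : List Int) (C : Nat) (h : C ≤ row.length) :
    pvPairs01 (row.take C) ((row.drop 1).take (C - 1))
      = ∑ j ∈ Finset.range (C - 1), pvP (row.getD j 0) (row.getD (j+1) 0) := by
  rw [pv_zipP]
  have hlen : min (row.take C).length ((row.drop 1).take (C-1)).length = C - 1 := by
    simp [List.length_take]; omega
  rw [hlen]
  apply Finset.sum_congr rfl
  intro j hj
  rw [Finset.mem_range] at hj
  rw [pv_getD_take row C j 0 (by omega), pv_getD_take _ (C-1) j 0 hj, pv_getD_drop,
    Nat.add_comm 1 j]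

lemma pv_pairs_vert (r1 r2 : List Int) (C : Nat) (h1 : C ≤ r1.length) (h2 : C ≤ r2.length) :
    pvPairs01 (r1.take C) (r2.take C)
      = ∑ j ∈ Finset.range C, pvP (r1.getD j 0) (r2.getD j 0) := by
  rw [pv_zipP]
  have hlen : min (r1.take C).length (r2.take C).length = C := by
    simp [List.length_take]; omega
  rw [hlen]
  apply Finset.sum_congr rfl
  intro j hj
  rw [Finset.mem_range] at hj
  rw [pv_getD_take r1 C j 0 hj, pv_getD_take r2 C j 0 hj]

lemma pv_grid (m : List (List Int)) :
    (∑ i ∈ Finset.range (pvR m), ∑ j ∈ Finset.range (pvC m), pvCell m i j)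
  = (∑ i ∈ Finset.range (pvR m), ∑ j ∈ Finset.range (pvC m - 1), pvP (pvV m i j) (pvV m i (j+1)))
  + (∑ i ∈ Finset.range (pvR m - 1), ∑ j ∈ Finset.range (pvC m), pvP (pvV m i j) (pvV m (i+1) j)) := by
  exact pv_grid_gen (pvV m) (pvR m) (pvC m)

lemma pv_slice1 (row : List Int) (C : Nat) :
    PySem.List.slice row (some 1) (some (C:Int)) = (row.drop 1).take (C - 1) := by
  have h1 : (1:Int) = ((1:Nat):Int) := rfl
  rw [h1, PySem.List.slice_natCast]

lemma pv_getD_mem (m : List (List Int)) (i : Nat) (h : i < m.length) : m.getD i [] ∈ m := by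
  rw [List.getD_eq_getElem m [] h]; exact List.getElem_mem h

lemma pv_B_pairs (m : List (List Int)) (hPre : Pre_findCoverage m) :
    findCoverage_alt m
  = (∑ i ∈ Finset.range (pvR m), ∑ j ∈ Finset.range (pvC m - 1), pvP (pvV m i j) (pvV m i (j+1)))
  + (∑ i ∈ Finset.range (pvR m - 1), ∑ j ∈ Finset.range (pvC m), pvP (pvV m i j) (pvV m (i+1) j)) := by
  by_cases hm : m = []
  · subst hm; simp [findCoverage_alt, pvR, pvC]
  · unfold findCoverage_alt
    rw [if_neg hm]
    simp only [PySem.List.slice_from_one, PySem.List.slice_to_natCast, pv_slice1]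
    rw [pv_map_getD ([] : List Int)
          (fun row => pvPairs01 (row.take (m.headD []).length)
            ((row.drop 1).take ((m.headD []).length - 1))) m,
        pv_zip_consec ([] : List Int)
          (fun r1 r2 => pvPairs01 (r1.take (m.headD []).length)
            (r2.take (m.headD []).length)) m]
    congr 1
    · apply Finset.sum_congr rfl
      intro i hi
      rw [Finset.mem_range] at hi
      have hrow := hPre (m.getD i []) (pv_getD_mem m i hi)
      exact pv_pairs_horiz (m.getD i []) (m.headD []).length hrow
    · apply Finset.sum_congr rfl
      intro i hi
      rw [Finset.mem_range] at hi
      have h1 : i < m.length := by omega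
      have h2 : i + 1 < m.length := by
        have : pvR m = m.length := rfl
        omega
      exact pv_pairs_vert (m.getD i []) (m.getD (i+1) []) (m.headD []).length
        (hPre _ (pv_getD_mem m i h1)) (hPre _ (pv_getD_mem m (i+1) h2))

-- ===== VERDICT (by name: the statement is the Claim_ definition above) =====
theorem findCoverage_spec : Claim_equal_findCoverage := by
  intro matrix _ hPre
  unfold Spec_findCoverage
  rw [pv_A_cells, pv_grid, pv_B_pairs matrix hPre]
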